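-- pv_equiv track=rewrite | github.com/santhoshtr/wikisentences | utils.py | capture_trailing_space
-- ===== SOURCE A (Python) =====
-- from typing import List
--
-- def capture_trailing_space(split_sentence: List[str]) -> List[str]:
--     # add documentation in sphinx format
--     """
--     This function concatenates a sentence only consisting of whitespaces as
--     trailing whitespaces to the previous sentence.
--     :params split_sentences: The list of splitted sentence from the sentence segmenter.
--     :type split_sentence: List of sentence segments
--
--     :return: A list of :class: `str` objects
--     :rtype: List[str]
--
--     """
--     final_sentences = []
--     idx = 0
--     num_sentences = len(split_sentence)
--
--     if num_sentences == 1: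
--         return split_sentence
--
--     while idx < num_sentences:
--         current_sentence = split_sentence[idx]
--         # capturing trailing spaces
--         while idx + 1 < num_sentences and split_sentence[idx + 1].strip() == "":
--             idx += 1
--             current_sentence += split_sentence[idx]
--         idx += 1
--         final_sentences.append(current_sentence)
--     return final_sentences
-- ===== SOURCE B (Python) =====
-- from typing import List
--
-- def capture_trailing_space(split_sentence: List[str]) -> List[str]:
--     result = []
--     for s in split_sentence:
--         if result and s.strip() == "":
--             result[-1] = result[-1] + s
--         else:
--             result.append(s)
--     return result
-- ===== Notes on version B (the rewrite author's own statement) =====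
-- stated objective: simpler
-- what changed: Replaced the index-driven outer while with a nested consuming inner while (and the single-element special case) by one forward for-loop that either appends the segment or concatenates a whitespace-only segment onto the last result element.
import Mathlib
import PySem

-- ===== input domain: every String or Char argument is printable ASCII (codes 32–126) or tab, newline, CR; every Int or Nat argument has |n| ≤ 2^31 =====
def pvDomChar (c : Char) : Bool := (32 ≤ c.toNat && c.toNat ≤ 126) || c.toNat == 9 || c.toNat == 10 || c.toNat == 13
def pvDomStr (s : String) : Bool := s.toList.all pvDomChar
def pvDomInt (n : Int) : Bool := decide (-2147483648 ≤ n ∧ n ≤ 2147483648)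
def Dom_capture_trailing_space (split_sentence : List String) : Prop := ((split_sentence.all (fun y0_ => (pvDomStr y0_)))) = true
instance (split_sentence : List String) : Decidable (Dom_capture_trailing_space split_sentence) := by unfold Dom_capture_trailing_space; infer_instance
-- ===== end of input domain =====

-- B is a single forward pass appending each segment, concatenating whitespace-only segments onto the
-- last result element — simpler than A's index-driven nested while loops (return-value equivalence).

-- ===== PORT A =====
-- A's inner `while idx+1 < num_sentences and split_sentence[idx+1].strip() == ""` loop:
-- consume the following whitespace-only segments into `current_sentence`.
def pvEatA (cur : String) : List String → String × List String
  | [] => (cur, [])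
  | t :: rest => if PySem.Str.strip t == "" then pvEatA (cur ++ t) rest else (cur, t :: rest)

theorem pvEatA_len (cur : String) (xs : List String) : (pvEatA cur xs).2.length ≤ xs.length := by
  induction xs generalizing cur with
  | nil => simp [pvEatA]
  | cons t rest ih =>
    simp only [pvEatA]
    split
    · exact le_trans (ih _) (Nat.le_succ _)
    · simp

-- A's outer `while idx < num_sentences` loop over the remaining segments.
def pvLoopA (xs : List String) : List String :=
  match xs with
  | [] => []
  | s :: rest => (pvEatA s rest).1 :: pvLoopA (pvEatA s rest).2
  termination_by xs.length
  decreasing_by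
    have := pvEatA_len s rest
    simp only [List.length_cons]
    omega

def capture_trailing_space (split_sentence : List String) : List String :=
  if split_sentence.length == 1 then split_sentence
  else pvLoopA split_sentence

-- ===== PORT B =====
def pvStepB (acc : List String) (s : String) : List String :=
  if !acc.isEmpty && PySem.Str.strip s == "" then
    acc.dropLast ++ [acc.getLastD "" ++ s]
  else
    acc ++ [s]

def capture_trailing_space_alt (split_sentence : List String) : List String :=
  split_sentence.foldl pvStepB []

-- ===== PRECONDITION & SPEC =====
def Spec_capture_trailing_space (split_sentence : List String) (out : List String) : Prop := out = capture_trailing_space_alt split_sentence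
instance (split_sentence : List String) (out : List String) : Decidable (Spec_capture_trailing_space split_sentence out) := by unfold Spec_capture_trailing_space; infer_instance

-- ===== CLAIM (what is proved, stated in full; the proofs are below) =====
def Claim_equal_capture_trailing_space : Prop := ∀ (split_sentence : List String), Dom_capture_trailing_space split_sentence → Spec_capture_trailing_space split_sentence (capture_trailing_space split_sentence)

-- ===== LEMMAS AND PROOFS =====

theorem pvLoopA_nil : pvLoopA [] = [] := by unfold pvLoopA; rfl

theorem pvLoopA_cons (s : String) (rest : List String) :
    pvLoopA (s :: rest) = (pvEatA s rest).1 :: pvLoopA (pvEatA s rest).2 := by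
  rw [pvLoopA]

-- Invariant: folding B's step from a non-empty accumulator `pre ++ [cur]` produces `pre` followed by
-- A's grouping of `cur` against the remaining segments.
theorem pvFold_inv (xs : List String) (pre : List String) (cur : String) :
    List.foldl pvStepB (pre ++ [cur]) xs =
      pre ++ ((pvEatA cur xs).1 :: pvLoopA (pvEatA cur xs).2) := by
  induction xs generalizing pre cur with
  | nil => simp [pvEatA, pvLoopA_nil]
  | cons t rest ih =>
    by_cases hw : PySem.Str.strip t == ""
    · have hstep : pvStepB (pre ++ [cur]) t = pre ++ [cur ++ t] := by
        simp [pvStepB, hw]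
      simp only [List.foldl_cons, hstep, ih, pvEatA, hw, if_pos]
    · have hstep : pvStepB (pre ++ [cur]) t = (pre ++ [cur]) ++ [t] := by
        simp [pvStepB, hw]
      rw [List.foldl_cons, hstep, ih (pre ++ [cur]) t]
      simp only [pvEatA, hw, Bool.false_eq_true, if_neg, not_false_iff,
        pvLoopA_cons, List.append_assoc, List.singleton_append]

-- B's fold computes A's grouping loop on any list.
theorem pvFold_eq_loop (xs : List String) : List.foldl pvStepB [] xs = pvLoopA xs := by
  cases xs with
  | nil => simp [pvLoopA_nil]
  | cons s rest =>
    have hstep : pvStepB [] s = [s] := by simp [pvStepB]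
    rw [List.foldl_cons, hstep]
    have := pvFold_inv rest [] s
    simp only [List.nil_append] at this
    rw [this, pvLoopA_cons]

-- ===== VERDICT (by name: the statement is the Claim_ definition above) =====
theorem capture_trailing_space_spec : Claim_equal_capture_trailing_space := by
  intro xs _
  unfold Spec_capture_trailing_space capture_trailing_space capture_trailing_space_alt
  rw [pvFold_eq_loop]
  split
  · -- length = 1: A returns the list itself, which equals its own grouping
    next h =>
      match xs, h with
      | [s], _ => rw [pvLoopA_cons]; simp [pvEatA, pvLoopA_nil]
  · rfl
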